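-- pv_equiv track=rewrite | github.com/8BitTacoSupreme/sbom_CVE_dash_demo | producers/sbom_producer.py | normalize_package_name
-- ===== SOURCE A (Python) =====
-- def normalize_package_name(name):
--     """
--     Normalize package name for PURL generation.
--     Remove common suffixes like -out, -lib, -dev, etc.
--     """
--     suffixes = ['-out', '-lib', '-dev', '-bin', '-doc', '-man', '-info']
--     normalized = name.lower()
--     for suffix in suffixes:
--         if normalized.endswith(suffix):
--             normalized = normalized[:-len(suffix)]
--             break
--     return normalized
-- ===== SOURCE B (Python) =====
-- def normalize_package_name(name):
--     """
--     Normalize package name for PURL generation: strip one common suffix.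
--     Splits at the last '-' and drops the tail when it is a known suffix word.
--     """
--     normalized = name.lower()
--     head, sep, tail = normalized.rpartition('-')
--     if sep and tail in {'out', 'lib', 'dev', 'bin', 'doc', 'man', 'info'}:
--         return head
--     return normalized
-- ===== Notes on version B (the rewrite author's own statement) =====
-- stated objective: alternative
-- what changed: A scans a list of seven suffix strings with endswith and slices on the first match; B does one rpartition at the last hyphen and a single membership test of the tail word against the suffix-word set.
import Mathlib
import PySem

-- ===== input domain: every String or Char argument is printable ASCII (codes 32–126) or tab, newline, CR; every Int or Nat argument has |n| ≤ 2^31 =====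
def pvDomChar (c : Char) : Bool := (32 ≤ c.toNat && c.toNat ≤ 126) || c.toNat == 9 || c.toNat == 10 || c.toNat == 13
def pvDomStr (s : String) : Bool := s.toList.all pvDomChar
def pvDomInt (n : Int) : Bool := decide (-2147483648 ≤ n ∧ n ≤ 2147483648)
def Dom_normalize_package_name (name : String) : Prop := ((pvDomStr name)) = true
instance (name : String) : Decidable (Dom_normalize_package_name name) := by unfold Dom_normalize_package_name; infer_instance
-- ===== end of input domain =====

-- B replaces A's endswith-scan over seven suffix strings by a single rpartition at the
-- last '-' followed by one membership test of the tail word (objective: alternative).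

-- ===== PORT A =====
-- the 'for suffix in suffixes: if … break' loop, as structural recursion over the suffix list
def npnStrip (suffixes : List String) (normalized : String) : String :=
  match suffixes with
  | [] => normalized
  | s :: rest =>
      if PySem.Str.endswith normalized s then
        PySem.Str.slice normalized none (some (-(PySem.Str.len s)))
      else npnStrip rest normalized

def normalize_package_name (name : String) : String :=
  npnStrip ["-out", "-lib", "-dev", "-bin", "-doc", "-man", "-info"] (PySem.Str.lower name)

-- ===== PORT B =====
-- hand port of str.rpartition('-') (exact: split at the LAST '-'): on the reversed
-- character list, takeWhile (· ≠ '-') is the reversed tail word and the rest of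
-- dropWhile is the reversed head; an empty dropWhile result means no separator found.
def npnRpart (normalized : String) : String :=
  match (normalized.toList.reverse).dropWhile (· ≠ '-') with
  | [] => normalized
  | _ :: hRev =>
      if ((normalized.toList.reverse).takeWhile (· ≠ '-')).reverse = "out".toList ∨
         ((normalized.toList.reverse).takeWhile (· ≠ '-')).reverse = "lib".toList ∨
         ((normalized.toList.reverse).takeWhile (· ≠ '-')).reverse = "dev".toList ∨
         ((normalized.toList.reverse).takeWhile (· ≠ '-')).reverse = "bin".toList ∨
         ((normalized.toList.reverse).takeWhile (· ≠ '-')).reverse = "doc".toList ∨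
         ((normalized.toList.reverse).takeWhile (· ≠ '-')).reverse = "man".toList ∨
         ((normalized.toList.reverse).takeWhile (· ≠ '-')).reverse = "info".toList then
        String.ofList hRev.reverse
      else normalized

def normalize_package_name_alt (name : String) : String :=
  npnRpart (PySem.Str.lower name)

-- ===== PRECONDITION & SPEC =====
def Spec_normalize_package_name (name : String) (out : String) : Prop := out = normalize_package_name_alt name
instance (name : String) (out : String) : Decidable (Spec_normalize_package_name name out) := by unfold Spec_normalize_package_name; infer_instance

-- ===== CLAIM (what is proved, stated in full; the proofs are below) =====
def Claim_equal_normalize_package_name : Prop := ∀ (name : String), Dom_normalize_package_name name → Spec_normalize_package_name name (normalize_package_name name)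

-- ===== LEMMAS AND PROOFS =====

-- the longest '-'-free prefix of 'a ++ '-' :: b' is a
lemma takeWhile_shape (a b : List Char) (ha : '-' ∉ a) :
    (a ++ '-' :: b).takeWhile (· ≠ '-') = a := by
  rw [List.takeWhile_append_of_pos (by
    intro x hx
    rw [decide_eq_true_eq]
    exact fun h => ha (h ▸ hx))]
  simp

-- A's endswith-test for the suffix '-'::w, phrased on the rpartition split of l
lemma ends_iff (l tRev hRev w : List Char) (hw : '-' ∉ w) (ht : '-' ∉ tRev)
    (hsplit : l.reverse = tRev ++ '-' :: hRev) :
    (PySem.Chars.endswith l ('-' :: w) = true) ↔ tRev = w.reverse := by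
  rw [PySem.Chars.endswith_iff]
  constructor
  · rintro ⟨t, ht'⟩
    have hrev : w.reverse ++ '-' :: t.reverse = tRev ++ '-' :: hRev := by
      rw [← hsplit, ← ht']; simp
    have hwr : '-' ∉ w.reverse := by simpa using hw
    have h1 := takeWhile_shape (w.reverse) (t.reverse) hwr
    have h2 := takeWhile_shape tRev hRev ht
    rw [hrev, h2] at h1
    exact h1
  · rintro rfl
    refine ⟨hRev.reverse, ?_⟩
    have hl : l = hRev.reverse ++ '-' :: w := by
      have := congrArg List.reverse hsplit
      simpa using this
    simp [hl]

-- A's slice normalized[:-(w.length+1)] on that split is the head part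
lemma slice_res (n : String) (hRev w : List Char)
    (hsplit : n.toList.reverse = w.reverse ++ '-' :: hRev) :
    PySem.Str.slice n none (some (-(((w.length : Int)) + 1))) = String.ofList hRev.reverse := by
  apply String.toList_inj.mp
  rw [PySem.Str.toList_slice, PySem.Chars.slice_eq_listSlice, String.toList_ofList]
  have hb : (-(((w.length : Int)) + 1)) = -(((w.length + 1 : Nat) : Int)) := by push_cast; ring
  rw [hb, PySem.List.slice_to_neg_natCast _ _ (by omega)]
  have hl : n.toList = hRev.reverse ++ '-' :: w := by
    have := congrArg List.reverse hsplit
    simpa using this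
  rw [hl]
  have hlen : (hRev.reverse ++ '-' :: w).length - (w.length + 1) = hRev.length := by
    simp
  rw [hlen, List.take_left' (by simp)]

-- the first element dropWhile keeps fails the predicate
lemma dropWhile_head_false (p : Char → Bool) (l xs : List Char) (x : Char)
    (h : l.dropWhile p = x :: xs) : p x = false := by
  induction l with
  | nil => simp at h
  | cons a l ih =>
      by_cases hp : p a
      · rw [List.dropWhile_cons_of_pos hp] at h
        exact ih h
      · rw [List.dropWhile_cons_of_neg hp] at h
        obtain ⟨rfl, -⟩ := List.cons.injEq .. ▸ h
        exact Bool.eq_false_iff.mpr hp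

-- nothing matches when the name has no '-'
lemma npnStrip_no_dash (suffixes : List String) (n : String)
    (hall : ∀ s ∈ suffixes, '-' ∈ s.toList) (hn : '-' ∉ n.toList) :
    npnStrip suffixes n = n := by
  induction suffixes with
  | nil => rfl
  | cons s rest ih =>
      have hse : PySem.Str.endswith n s = false := by
        rw [Bool.eq_false_iff]
        intro h
        have hsfx : s.toList <:+ n.toList := by
          rw [← PySem.Chars.endswith_iff]; simpa using h
        exact hn (hsfx.subset (hall s (by simp)))
      simp only [npnStrip, hse, Bool.false_eq_true, if_neg, not_false_iff]
      exact ih (fun t htm => hall t (List.mem_cons_of_mem _ htm))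

-- the central equivalence, for an arbitrary (already lowered) string
lemma core_eq (n : String) :
    npnStrip ["-out", "-lib", "-dev", "-bin", "-doc", "-man", "-info"] n = npnRpart n := by
  cases hdrop : (n.toList.reverse).dropWhile (· ≠ '-') with
  | nil =>
      have hn : '-' ∉ n.toList := by
        intro hm
        have hm' : '-' ∈ n.toList.reverse := by simpa using hm
        have := (List.dropWhile_eq_nil_iff).1 hdrop _ hm'
        simp at this
      rw [npnStrip_no_dash _ _ (by decide) hn]
      unfold npnRpart
      rw [hdrop]
  | cons c hRev =>
      have hcne : c = '-' := by
        have := dropWhile_head_false (· ≠ '-') (n.toList.reverse) hRev c hdrop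
        simpa using this
      subst hcne
      have hsplit : n.toList.reverse =
          ((n.toList.reverse).takeWhile (· ≠ '-')) ++ '-' :: hRev := by
        conv_lhs => rw [← List.takeWhile_append_dropWhile (p := (· ≠ '-')) (l := n.toList.reverse)]
        rw [hdrop]
      set tRev := (n.toList.reverse).takeWhile (· ≠ '-') with htR
      have ht : '-' ∉ tRev := by
        intro hm
        have := List.mem_takeWhile_imp hm
        simp at this
      have h1 : (PySem.Str.endswith n "-out" = true) ↔ tRev = ['t','u','o'] := by
        rw [PySem.Str.endswith_eq]
        exact ends_iff n.toList tRev hRev ['o','u','t'] (by decide) ht hsplit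
      have h2 : (PySem.Str.endswith n "-lib" = true) ↔ tRev = ['b','i','l'] := by
        rw [PySem.Str.endswith_eq]
        exact ends_iff n.toList tRev hRev ['l','i','b'] (by decide) ht hsplit
      have h3 : (PySem.Str.endswith n "-dev" = true) ↔ tRev = ['v','e','d'] := by
        rw [PySem.Str.endswith_eq]
        exact ends_iff n.toList tRev hRev ['d','e','v'] (by decide) ht hsplit
      have h4 : (PySem.Str.endswith n "-bin" = true) ↔ tRev = ['n','i','b'] := by
        rw [PySem.Str.endswith_eq]
        exact ends_iff n.toList tRev hRev ['b','i','n'] (by decide) ht hsplit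
      have h5 : (PySem.Str.endswith n "-doc" = true) ↔ tRev = ['c','o','d'] := by
        rw [PySem.Str.endswith_eq]
        exact ends_iff n.toList tRev hRev ['d','o','c'] (by decide) ht hsplit
      have h6 : (PySem.Str.endswith n "-man" = true) ↔ tRev = ['n','a','m'] := by
        rw [PySem.Str.endswith_eq]
        exact ends_iff n.toList tRev hRev ['m','a','n'] (by decide) ht hsplit
      have h7 : (PySem.Str.endswith n "-info" = true) ↔ tRev = ['o','f','n','i'] := by
        rw [PySem.Str.endswith_eq]
        exact ends_iff n.toList tRev hRev ['i','n','f','o'] (by decide) ht hsplit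
      have hres : ∀ (w : List Char), tRev = w.reverse →
          PySem.Str.slice n none (some (-(((w.length : Int)) + 1))) = String.ofList hRev.reverse := by
        intro w hwv
        exact slice_res n hRev w (by rw [← hwv]; exact hsplit)
      unfold npnRpart
      rw [hdrop, ← htR]
      simp only [npnStrip]
      by_cases e1 : tRev = ['t','u','o']
      · rw [if_pos (h1.mpr e1), if_pos (Or.inl (by rw [e1]; rfl))]
        have hb : -(PySem.Str.len "-out") = -((((['o','u','t'] : List Char).length : Int)) + 1) := by decide
        rw [hb]; exact hres ['o','u','t'] e1
      · rw [if_neg (fun hh => e1 (h1.mp hh))]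
        by_cases e2 : tRev = ['b','i','l']
        · rw [if_pos (h2.mpr e2), if_pos (Or.inr (Or.inl (by rw [e2]; rfl)))]
          have hb : -(PySem.Str.len "-lib") = -((((['l','i','b'] : List Char).length : Int)) + 1) := by decide
          rw [hb]; exact hres ['l','i','b'] e2
        · rw [if_neg (fun hh => e2 (h2.mp hh))]
          by_cases e3 : tRev = ['v','e','d']
          · rw [if_pos (h3.mpr e3), if_pos (Or.inr (Or.inr (Or.inl (by rw [e3]; rfl))))]
            have hb : -(PySem.Str.len "-dev") = -((((['d','e','v'] : List Char).length : Int)) + 1) := by decide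
            rw [hb]; exact hres ['d','e','v'] e3
          · rw [if_neg (fun hh => e3 (h3.mp hh))]
            by_cases e4 : tRev = ['n','i','b']
            · rw [if_pos (h4.mpr e4), if_pos (Or.inr (Or.inr (Or.inr (Or.inl (by rw [e4]; rfl)))))]
              have hb : -(PySem.Str.len "-bin") = -((((['b','i','n'] : List Char).length : Int)) + 1) := by decide
              rw [hb]; exact hres ['b','i','n'] e4
            · rw [if_neg (fun hh => e4 (h4.mp hh))]
              by_cases e5 : tRev = ['c','o','d']
              · rw [if_pos (h5.mpr e5), if_pos (Or.inr (Or.inr (Or.inr (Or.inr (Or.inl (by rw [e5]; rfl))))))]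
                have hb : -(PySem.Str.len "-doc") = -((((['d','o','c'] : List Char).length : Int)) + 1) := by decide
                rw [hb]; exact hres ['d','o','c'] e5
              · rw [if_neg (fun hh => e5 (h5.mp hh))]
                by_cases e6 : tRev = ['n','a','m']
                · rw [if_pos (h6.mpr e6), if_pos (Or.inr (Or.inr (Or.inr (Or.inr (Or.inr (Or.inl (by rw [e6]; rfl)))))))]
                  have hb : -(PySem.Str.len "-man") = -((((['m','a','n'] : List Char).length : Int)) + 1) := by decide
                  rw [hb]; exact hres ['m','a','n'] e6
                · rw [if_neg (fun hh => e6 (h6.mp hh))]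
                  by_cases e7 : tRev = ['o','f','n','i']
                  · rw [if_pos (h7.mpr e7), if_pos (Or.inr (Or.inr (Or.inr (Or.inr (Or.inr (Or.inr (by rw [e7]; rfl)))))))]
                    have hb : -(PySem.Str.len "-info") = -((((['i','n','f','o'] : List Char).length : Int)) + 1) := by decide
                    rw [hb]; exact hres ['i','n','f','o'] e7
                  · rw [if_neg (fun hh => e7 (h7.mp hh))]
                    rw [if_neg (by
                      rintro (d | d | d | d | d | d | d)
                      · exact e1 (by rw [List.reverse_eq_iff] at d; exact d)
                      · exact e2 (by rw [List.reverse_eq_iff] at d; exact d)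
                      · exact e3 (by rw [List.reverse_eq_iff] at d; exact d)
                      · exact e4 (by rw [List.reverse_eq_iff] at d; exact d)
                      · exact e5 (by rw [List.reverse_eq_iff] at d; exact d)
                      · exact e6 (by rw [List.reverse_eq_iff] at d; exact d)
                      · exact e7 (by rw [List.reverse_eq_iff] at d; exact d))]

-- ===== VERDICT (by name: the statement is the Claim_ definition above) =====
theorem normalize_package_name_spec : Claim_equal_normalize_package_name := by
  intro name _
  unfold Spec_normalize_package_name normalize_package_name normalize_package_name_alt
  exact core_eq _
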